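-- pv_equiv track=rewrite | github.com/Choppovm/Bebras-practice | e1b3af20c4ba51d8/fibonacci.py | findRepeatedDigitNumber
-- ===== SOURCE A (Python) =====
-- def isRepeatedDigit(number):
--     return len(set(str(number))) == 1
--
-- def findRepeatedDigitNumber(first, second):
--     sequence = [first, second]
--     for _ in range(23):
--         nextNumber = sequence[-1] + sequence[-2]
--         sequence.append(nextNumber)
--     for number in sequence:
--         if number > 9 and isRepeatedDigit(number):
--             return number
--     return -1
-- ===== SOURCE B (Python) =====
-- _COEFFS = [(0, 1), (1, 0), (1, 1), (2, 1), (3, 2), (5, 3), (8, 5), (13, 8),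
--            (21, 13), (34, 21), (55, 34), (89, 55), (144, 89), (233, 144),
--            (377, 233), (610, 377), (987, 610), (1597, 987), (2584, 1597),
--            (4181, 2584), (6765, 4181), (10946, 6765), (17711, 10946),
--            (28657, 17711), (46368, 28657)]
--
-- def findRepeatedDigitNumber(first, second):
--     # term k of the sequence is F(k)*second + F(k-1)*first (fixed coefficients),
--     # so each candidate is computed directly from a constant table, no recurrence.
--     for a, b in _COEFFS:
--         n = b * first + a * second
--         if n > 9 and len(set(str(n))) == 1:
--             return n
--     return -1
-- ===== Notes on version B (the rewrite author's own statement) =====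
-- stated objective: alternative
-- what changed: B eliminates the runtime recurrence and the stored 25-element list: each candidate term is computed directly as a fixed linear combination F(k)*second + F(k-1)*first from a constant table of Fibonacci coefficient pairs, scanned once for the first multi-digit repdigit.
import Mathlib
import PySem

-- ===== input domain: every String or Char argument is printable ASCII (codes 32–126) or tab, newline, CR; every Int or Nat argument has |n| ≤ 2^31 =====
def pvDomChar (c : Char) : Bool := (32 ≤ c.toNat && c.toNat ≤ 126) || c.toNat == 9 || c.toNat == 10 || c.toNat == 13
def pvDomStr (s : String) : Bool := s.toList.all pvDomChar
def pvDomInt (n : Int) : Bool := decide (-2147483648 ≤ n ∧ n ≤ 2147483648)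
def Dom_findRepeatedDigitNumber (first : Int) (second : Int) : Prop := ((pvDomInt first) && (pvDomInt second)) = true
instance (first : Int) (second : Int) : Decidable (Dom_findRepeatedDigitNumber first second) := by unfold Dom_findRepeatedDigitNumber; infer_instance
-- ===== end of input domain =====

-- B drops the runtime recurrence and the stored list: each term is F(k)*second + F(k-1)*first
-- taken from a constant Fibonacci coefficient table and checked as computed; objective: alternative.

-- ===== PORT A =====
-- len(set(str(number))) == 1
def isRepeatedDigit (number : Int) : Bool :=
  (PySem.Set.ofList (PySem.Int.toStr number).toList).length == 1

-- the second for-loop: return the first qualifying element, else -1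
def scanA : List Int → Int
  | [] => -1
  | n :: rest => if n > 9 && isRepeatedDigit n then n else scanA rest

def findRepeatedDigitNumber (first : Int) (second : Int) : Int :=
  let sequence := (PySem.List.pyRange 0 23 1).foldl
    (fun seq _ =>
      let nextNumber := PySem.List.pyGetD seq (-1) 0 + PySem.List.pyGetD seq (-2) 0
      seq ++ [nextNumber])
    [first, second]
  scanA sequence

-- ===== PORT B =====
-- the constant table _COEFFS of (F(k), F(k-1)) pairs
def coeffsB : List (Int × Int) :=
  [(0, 1), (1, 0), (1, 1), (2, 1), (3, 2), (5, 3), (8, 5), (13, 8),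
   (21, 13), (34, 21), (55, 34), (89, 55), (144, 89), (233, 144),
   (377, 233), (610, 377), (987, 610), (1597, 987), (2584, 1597),
   (4181, 2584), (6765, 4181), (10946, 6765), (17711, 10946),
   (28657, 17711), (46368, 28657)]

-- the for-loop over the table: n = b*first + a*second, inline repdigit test
def scanB (first second : Int) : List (Int × Int) → Int
  | [] => -1
  | (a, b) :: rest =>
      let n := b * first + a * second
      if n > 9 && (PySem.Set.ofList (PySem.Int.toStr n).toList).length == 1
      then n else scanB first second rest

def findRepeatedDigitNumber_alt (first : Int) (second : Int) : Int :=
  scanB first second coeffsB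

-- ===== PRECONDITION & SPEC =====
def Spec_findRepeatedDigitNumber (first : Int) (second : Int) (out : Int) : Prop := out = findRepeatedDigitNumber_alt first second
instance (first : Int) (second : Int) (out : Int) : Decidable (Spec_findRepeatedDigitNumber first second out) := by unfold Spec_findRepeatedDigitNumber; infer_instance

-- ===== CLAIM (what is proved, stated in full; the proofs are below) =====
def Claim_equal_findRepeatedDigitNumber : Prop := ∀ (first : Int) (second : Int), Dom_findRepeatedDigitNumber first second → Spec_findRepeatedDigitNumber first second (findRepeatedDigitNumber first second)

-- ===== LEMMAS AND PROOFS =====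

-- the tail of the sequence generated from last two values a, b
def gen : Int → Int → Nat → List Int
  | _, _, 0 => []
  | a, b, k + 1 => (a + b) :: gen b (a + b) k

def stepA (seq : List Int) : List Int :=
  seq ++ [PySem.List.pyGetD seq (-1) 0 + PySem.List.pyGetD seq (-2) 0]

theorem foldl_const_iterate {α β : Type} (L : List α) (f : β → β) (s : β) :
    L.foldl (fun acc _ => f acc) s = f^[L.length] s := by
  induction L generalizing s with
  | nil => rfl
  | cons x xs ih =>
      simp only [List.foldl_cons, List.length_cons, ih, Function.iterate_succ_apply]

theorem pyGetD_neg_two_append (s : List Int) (a b : Int) :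
    PySem.List.pyGetD (s ++ [a, b]) (-2) 0 = a := by
  rw [PySem.List.pyGetD_neg_ofNat (s ++ [a, b]) 2 0 (by omega) (by simp)]
  simp [List.getElem_append_right]

theorem stepA_append (s : List Int) (a b : Int) :
    stepA (s ++ [a, b]) = (s ++ [a]) ++ [b, b + a] := by
  unfold stepA
  rw [show s ++ [a, b] = (s ++ [a]) ++ [b] by simp]
  rw [PySem.List.pyGetD_neg_one_append_singleton]
  rw [show (s ++ [a]) ++ [b] = s ++ [a, b] by simp]
  rw [pyGetD_neg_two_append]
  simp

theorem iterate_stepA (k : Nat) : ∀ (a b : Int) (s : List Int),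
    stepA^[k] (s ++ [a, b]) = (s ++ [a, b]) ++ gen a b k := by
  induction k with
  | zero => intro a b s; simp [gen]
  | succ k ih =>
      intro a b s
      rw [Function.iterate_succ_apply, stepA_append]
      rw [show ((s ++ [a]) ++ [b, b + a]) = (s ++ [a]) ++ [b, b + a] from rfl, ih]
      simp [gen, Int.add_comm b a, List.append_assoc]

-- B's table-driven scan is A's scan over the list of linear combinations
theorem scanB_eq_scanA (first second : Int) :
    ∀ l : List (Int × Int),
      scanB first second l = scanA (l.map (fun p => p.2 * first + p.1 * second)) := by
  intro l
  induction l with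
  | nil => rfl
  | cons p rest ih =>
      obtain ⟨a, b⟩ := p
      simp [scanB, scanA, isRepeatedDigit, ih]

-- coefficient table generated by the recurrence of gen: entry k of combTable n is (F(k), F(k+1))
def combTable : Nat → List (Int × Int)
  | 0 => []
  | k + 1 => (1, 1) :: (combTable k).map (fun p => (p.2, p.1 + p.2))

theorem gen_comb : ∀ (k : Nat) (a b : Int),
    gen a b k = (combTable k).map (fun p => p.1 * a + p.2 * b) := by
  intro k
  induction k with
  | zero => intro a b; rfl
  | succ k ih =>
      intro a b
      simp only [gen, combTable, List.map_cons, ih, List.map_map]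
      congr 1
      · ring
      · refine List.map_congr_left ?_
        intro p _
        simp only [Function.comp_apply]
        ring

-- the 25 sequence values ARE the linear combinations from the coefficient table
theorem seq_eq_comb (first second : Int) :
    [first, second] ++ gen first second 23
      = coeffsB.map (fun p => p.2 * first + p.1 * second) := by
  rw [gen_comb, show combTable 23 = [(1, 1), (1, 2), (2, 3), (3, 5), (5, 8), (8, 13), (13, 21), (21, 34), (34, 55), (55, 89), (89, 144), (144, 233), (233, 377), (377, 610), (610, 987), (987, 1597), (1597, 2584), (2584, 4181), (4181, 6765), (6765, 10946), (10946, 17711), (17711, 28657), (28657, 46368)] from by decide]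
  simp only [coeffsB, List.map_cons, List.map_nil, List.cons_append, List.nil_append, List.cons.injEq]
  exact ⟨by ring, by ring, trivial⟩

-- ===== VERDICT (by name: the statement is the Claim_ definition above) =====
theorem findRepeatedDigitNumber_spec : Claim_equal_findRepeatedDigitNumber := by
  intro first second _
  unfold Spec_findRepeatedDigitNumber findRepeatedDigitNumber findRepeatedDigitNumber_alt
  rw [show (fun (seq : List Int) (_ : Int) =>
        let nextNumber := PySem.List.pyGetD seq (-1) 0 + PySem.List.pyGetD seq (-2) 0
        seq ++ [nextNumber]) = (fun seq _ => stepA seq) from rfl]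
  rw [foldl_const_iterate]
  rw [show (PySem.List.pyRange 0 23 1).length = 23 by decide]
  rw [show ([first, second] : List Int) = [] ++ [first, second] by simp, iterate_stepA]
  rw [List.nil_append, seq_eq_comb, scanB_eq_scanA]
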